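-- pv_equiv track=rewrite | github.com/birukbelay/dsa-questions | a2sv-remote/contest/contest24-mini/B. Two Buttons.py | find
-- ===== SOURCE A (Python) =====
-- from collections import deque
--
-- def find(n, m):
--     #9999 10000
--     #4 6
--
--     # diff1= n*2 -m
--     # diff2 = n- m//2
--     ctr=0
--     que= deque()
--
--
--     visited= set()
--     que.append(n)
--
--
--     while que:
--         for i in range(len(que)):
--
--             cur= que.popleft()
--             if cur==m:
--                 return ctr
--
--
--             if cur-1 not in visited or cur-1 !=0:
--                 que.append(cur-1)
--                 visited.add(cur)
--             if cur<m:
--                 if cur *2 not in visited: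
--                     que.append(cur*2)
--                     visited.add(cur*2)
--
--         ctr+=1
--     return ctr
-- ===== SOURCE B (Python) =====
-- def find(n, m):
--     ops = 0
--     while m > n:
--         if m % 2 == 0:
--             m //= 2
--         else:
--             m += 1
--         ops += 1
--     return ops + (n - m)
-- ===== Notes on version B (the rewrite author's own statement) =====
-- stated objective: faster
-- what changed: Replaces the exponential-frontier BFS over the state graph (deque plus visited set, counting levels) by the classic greedy working backward from m: halve m when even, else increment, then add the remaining decrements n - m.
import Mathlib
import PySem

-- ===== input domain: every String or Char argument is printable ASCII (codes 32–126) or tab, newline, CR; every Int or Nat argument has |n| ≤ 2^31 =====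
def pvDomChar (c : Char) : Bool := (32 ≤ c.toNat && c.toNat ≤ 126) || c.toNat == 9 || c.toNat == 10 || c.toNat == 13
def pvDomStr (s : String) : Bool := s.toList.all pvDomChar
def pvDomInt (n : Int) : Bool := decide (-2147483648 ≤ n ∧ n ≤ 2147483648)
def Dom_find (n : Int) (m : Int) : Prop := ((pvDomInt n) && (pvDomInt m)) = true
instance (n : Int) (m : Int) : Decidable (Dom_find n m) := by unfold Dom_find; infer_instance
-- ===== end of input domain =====

-- B replaces A's exponential-frontier BFS by the greedy backward walk from m (halve when even, else
-- increment, then add the remaining decrements): objective FASTER. Equality is proved on Pre_find,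
-- exactly the inputs on which Python A terminates.

-- ===== PORT A =====
-- One BFS level: Python's `for i in range(len(que)): cur = que.popleft(); ...` processes exactly the
-- elements present when the level starts (`old`), carrying the appended tail (`acc`); `none` is
-- Python's `return ctr`.  Python's hash set `visited` is modelled by Std.HashSet (exact for the
-- membership tests / adds A performs; its iteration order is never used).  The deque's O(1) right
-- appends are ported as the standard cons-accumulator (`acc` holds the appended elements reversed;
-- the level's final queue is `acc.reverse`, the same list Python's appends build).
def findInner (m : Int) : List Int → List Int → Std.HashSet Int → Option (List Int × Std.HashSet Int)
  | [], acc, vis => some (acc.reverse, vis)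
  | cur :: rest, acc, vis =>
    if cur = m then none
    else
      let p1 : List Int × Std.HashSet Int :=
        if vis.contains (cur - 1) = false ∨ cur - 1 ≠ 0 then
          ((cur - 1) :: acc, vis.insert cur)
        else (acc, vis)
      let p2 : List Int × Std.HashSet Int :=
        if cur < m ∧ p1.2.contains (cur * 2) = false then
          ((cur * 2) :: p1.1, p1.2.insert (cur * 2))
        else p1
      findInner m rest p2.1 p2.2

-- Python's `while que:` loop with fuel (outside Pre_find Python A never terminates); on Pre_find the
-- fuel is provably sufficient (outer_spec below), so the port computes exactly what A computes.
def findOuter (m : Int) : Nat → List Int → Std.HashSet Int → Int → Int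
  | 0, _, _, ctr => ctr
  | fuel + 1, que, vis, ctr =>
    if que = [] then ctr
    else
      match findInner m que [] vis with
      | none => ctr
      | some (que', vis') => findOuter m fuel que' vis' (ctr + 1)

def find (n : Int) (m : Int) : Int :=
  findOuter m (n.natAbs + 2 * m.natAbs + 3) [n] (∅ : Std.HashSet Int) 0

-- ===== PORT B =====
-- Source B's `while m > n:` loop with fuel (Source B's loop diverges outside Pre_find); on Pre_find the fuel
-- is provably sufficient (altGo_spec below).
def findAltGo (n : Int) : Nat → Int → Int → Int
  | 0, _, ops => ops
  | fuel + 1, m, ops =>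
    if m > n then
      if PySem.Int.mod m 2 = 0 then findAltGo n fuel (PySem.Int.floordiv m 2) (ops + 1)
      else findAltGo n fuel (m + 1) (ops + 1)
    else ops + (n - m)

def find_alt (n : Int) (m : Int) : Int :=
  findAltGo n (n.natAbs + 2 * m.natAbs + 3) m 0

-- ===== PRECONDITION & SPEC =====
-- Pre_find excludes exactly the inputs (n ≤ 0 and n < m) on which Python A loops forever: from such
-- an n the two moves only ever produce values ≤ n, so the BFS never reaches m and never stops.
def Pre_find (n : Int) (m : Int) : Prop := 1 ≤ n ∨ m ≤ n
instance (n : Int) (m : Int) : Decidable (Pre_find n m) := by unfold Pre_find; infer_instance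
def pvWitness_find : Int × Int := (3, 10)

def Spec_find (n : Int) (m : Int) (out : Int) : Prop := out = find_alt n m
instance (n : Int) (m : Int) (out : Int) : Decidable (Spec_find n m out) := by unfold Spec_find; infer_instance

-- ===== CLAIM (what is proved, stated in full; the proofs are below) =====
def Claim_equal_find : Prop := ∀ (n : Int) (m : Int), Dom_find n m → Pre_find n m → Spec_find n m (find n m)

-- ===== LEMMAS AND PROOFS =====

-- One move of A's search: decrement always, double only while below m (A's guard `if cur < m`).
def stepR (m x y : Int) : Prop := y = x - 1 ∨ (x < m ∧ y = x * 2)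

-- y reachable from x in exactly k moves.
def ReachN (m : Int) : Nat → Int → Int → Prop
  | 0, x, y => x = y
  | k + 1, x, y => ∃ z, stepR m x z ∧ ReachN m k z y

-- x first reached from n at BFS level k.
def minR (n m : Int) (k : Nat) (x : Int) : Prop :=
  ReachN m k n x ∧ ∀ j, j < k → ¬ ReachN m j n x

-- The value both programs compute: greedy backward count (junk 0 outside Pre_find's n<1 region).
def gN (n : Int) (m : Int) : Nat :=
  if h1 : m ≤ n then (n - m).toNat
  else if h2 : n < 1 then 0
  else if h3 : m % 2 = 0 then gN n (m / 2) + 1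
  else gN n ((m + 1) / 2) + 2
termination_by m.toNat
decreasing_by all_goals omega

theorem gN_base {n m : Int} (h : m ≤ n) : gN n m = (n - m).toNat := by
  rw [gN]; simp [h]

theorem gN_even {n m : Int} (hn : 1 ≤ n) (h : n < m) (he : m % 2 = 0) :
    gN n m = gN n (m / 2) + 1 := by
  rw [gN, dif_neg (by omega), dif_neg (by omega), dif_pos he]

theorem gN_odd {n m : Int} (hn : 1 ≤ n) (h : n < m) (ho : ¬ m % 2 = 0) :
    gN n m = gN n ((m + 1) / 2) + 2 := by
  rw [gN, dif_neg (by omega), dif_neg (by omega), dif_neg ho]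

theorem gN_le_bound (n m : Int) : gN n m ≤ n.natAbs + 2 * m.natAbs + 2 := by
  induction m using gN.induct n with
  | case1 m h1 => rw [gN_base h1]; omega
  | case2 m h1 h2 => rw [gN, dif_neg h1, dif_pos h2]; omega
  | case3 m h1 h2 h3 ih => rw [gN_even (by omega) (by omega) h3]; omega
  | case4 m h1 h2 h3 ih => rw [gN_odd (by omega) (by omega) h3]; omega

theorem reach_snoc {m : Int} : ∀ {k : Nat} {x z y : Int},
    ReachN m k x z → stepR m z y → ReachN m (k + 1) x y := by
  intro k
  induction k with
  | zero =>
    intro x z y h hs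
    have hxz : x = z := h
    subst hxz
    exact ⟨y, hs, rfl⟩
  | succ k ih =>
    intro x z y h hs
    obtain ⟨w, hw, hr⟩ := h
    exact ⟨w, hw, ih hr hs⟩

theorem reach_mono {m' m : Int} (hm : m' ≤ m) : ∀ {k : Nat} {x y : Int},
    ReachN m' k x y → ReachN m k x y := by
  intro k
  induction k with
  | zero => intro x y h; exact h
  | succ k ih =>
    intro x y h
    obtain ⟨z, hs, hr⟩ := h
    refine ⟨z, ?_, ih hr⟩
    rcases hs with h' | ⟨hlt, he⟩
    · exact Or.inl h'
    · exact Or.inr ⟨lt_of_lt_of_le hlt hm, he⟩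

theorem reach_dec {m : Int} : ∀ (k : Nat) (x : Int), ReachN m k x (x - (k : Int)) := by
  intro k
  induction k with
  | zero => intro x; show x = x - ((0 : Nat) : Int); simp
  | succ k ih =>
    intro x
    refine ⟨x - 1, Or.inl rfl, ?_⟩
    have he : x - ((k + 1 : Nat) : Int) = (x - 1) - (k : Int) := by push_cast; ring
    rw [he]
    exact ih (x - 1)

theorem noreach {m : Int} : ∀ (k : Nat) (z : Int), z < m → z ≤ 0 → ¬ ReachN m k z m := by
  intro k
  induction k with
  | zero =>
    intro z h1 h2 h
    have : z = m := h
    omega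
  | succ k ih =>
    rintro z h1 h2 ⟨w, hw, hr⟩
    rcases hw with h' | ⟨hlt, h'⟩
    · subst h'; exact ih (z - 1) (by omega) (by omega) hr
    · subst h'; exact ih (z * 2) (by omega) (by omega) hr

theorem reach_destruct {m : Int} : ∀ {k : Nat} {x y : Int},
    ReachN m (k + 1) x y → ∃ p, ReachN m k x p ∧ stepR m p y := by
  intro k
  induction k with
  | zero =>
    intro x y h
    obtain ⟨z, hs, hr⟩ := h
    have : z = y := hr
    subst this
    exact ⟨x, rfl, hs⟩
  | succ k ih =>
    intro x y h
    obtain ⟨z, hs, hr⟩ := h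
    obtain ⟨p, hp, hpy⟩ := ih hr
    exact ⟨p, ⟨z, hs, hp⟩, hpy⟩

theorem parent_minR {n m : Int} {k : Nat} {x : Int} (h : minR n m (k + 1) x) :
    ∃ p, minR n m k p ∧ stepR m p x := by
  obtain ⟨hr, hmin⟩ := h
  obtain ⟨p, hp, hs⟩ := reach_destruct hr
  refine ⟨p, ⟨hp, ?_⟩, hs⟩
  intro j hj hrj
  exact hmin (j + 1) (by omega) (reach_snoc hrj hs)

theorem levels_down {n m : Int} : ∀ (d : Nat), (∃ x, minR n m d x) →
    ∀ k ≤ d, ∃ x, minR n m k x := by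
  intro d
  induction d with
  | zero =>
    intro h k hk
    have : k = 0 := by omega
    subst this; exact h
  | succ d ih =>
    intro h k hk
    by_cases hkd : k = d + 1
    · subst hkd; exact h
    · obtain ⟨x, hx⟩ := h
      obtain ⟨p, hp, _⟩ := parent_minR hx
      exact ih ⟨p, hp⟩ k (by omega)

theorem gN_dec_step (m x : Int) (h2 : 2 ≤ x) (hxm : x < m) :
    gN x m ≤ gN (x - 1) m + 1 := by
  by_cases he : m % 2 = 0
  · rw [gN_even (by omega) hxm he, gN_even (by omega) (by omega) he]
    by_cases hx2 : x < m / 2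
    · have := gN_dec_step (m / 2) x h2 hx2
      omega
    · by_cases hq : m / 2 ≤ x - 1
      · rw [gN_base (by omega), gN_base hq]
        omega
      · rw [gN_base (by omega)]
        omega
  · rw [gN_odd (by omega) hxm he, gN_odd (by omega) (by omega) he]
    by_cases hx2 : x < (m + 1) / 2
    · have := gN_dec_step ((m + 1) / 2) x h2 hx2
      omega
    · by_cases hq : (m + 1) / 2 ≤ x - 1
      · rw [gN_base (by omega), gN_base hq]
        omega
      · rw [gN_base (by omega)]
        omega
termination_by m.toNat
decreasing_by all_goals omega

theorem gN_dbl_step (m x : Int) (h1 : 1 ≤ x) (hxm : x < m) :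
    gN x m ≤ gN (x * 2) m + 1 := by
  by_cases he : m % 2 = 0
  · rw [gN_even (by omega) hxm he]
    by_cases hd : m ≤ x * 2
    · rw [gN_base hd, gN_base (by omega : m / 2 ≤ x)]
      omega
    · rw [gN_even (by omega) (by omega) he]
      by_cases hx2 : x < m / 2
      · have := gN_dbl_step (m / 2) x h1 hx2
        omega
      · rw [gN_base (by omega : m / 2 ≤ x), gN_base (by omega : m / 2 ≤ x * 2)]
        omega
  · rw [gN_odd (by omega) hxm he]
    by_cases hd : m ≤ x * 2
    · rw [gN_base hd, gN_base (by omega : (m + 1) / 2 ≤ x)]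
      omega
    · rw [gN_odd (by omega) (by omega) he]
      have hx2 : x < (m + 1) / 2 := by omega
      have := gN_dbl_step ((m + 1) / 2) x h1 hx2
      omega
termination_by m.toNat
decreasing_by all_goals omega

theorem reach_gN (n m : Int) (hpre : 1 ≤ n ∨ m ≤ n) : ReachN m (gN n m) n m := by
  by_cases hb : m ≤ n
  · rw [gN_base hb]
    have h := reach_dec (m := m) ((n - m).toNat) n
    have he : n - (((n - m).toNat : Nat) : Int) = m := by omega
    rwa [he] at h
  · have hn : 1 ≤ n := hpre.resolve_right hb
    have hnm : n < m := by omega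
    by_cases he : m % 2 = 0
    · rw [gN_even hn hnm he]
      have ih := reach_gN n (m / 2) (Or.inl hn)
      have ih' := reach_mono (by omega : m / 2 ≤ m) ih
      exact reach_snoc ih' (Or.inr ⟨by omega, by omega⟩)
    · rw [gN_odd hn hnm he]
      have ih := reach_gN n ((m + 1) / 2) (Or.inl hn)
      have ih' := reach_mono (by omega : (m + 1) / 2 ≤ m) ih
      have h1 : ReachN m (gN n ((m + 1) / 2) + 1) n (m + 1) :=
        reach_snoc ih' (Or.inr ⟨by omega, by omega⟩)
      exact reach_snoc h1 (Or.inl (by omega))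
termination_by m.toNat
decreasing_by all_goals omega

theorem reach_ge (m : Int) : ∀ (k : Nat) (x : Int), (1 ≤ x ∨ m ≤ x) →
    ReachN m k x m → gN x m ≤ k := by
  intro k
  induction k with
  | zero =>
    intro x hv h
    have : x = m := h
    subst this
    rw [gN_base le_rfl]
    omega
  | succ k ih =>
    intro x hv h
    obtain ⟨z, hs, hr⟩ := h
    by_cases hvz : 1 ≤ z ∨ m ≤ z
    · have ihz := ih z hvz hr
      rcases hs with hz | ⟨hxm, hz⟩
      · subst hz
        by_cases hmx : m ≤ x
        · by_cases hxe : x = m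
          · subst hxe; rw [gN_base le_rfl]; omega
          · rw [gN_base hmx]
            rw [gN_base (by omega)] at ihz
            omega
        · have hx1 : 1 ≤ x := hv.resolve_right hmx
          have h2 : 2 ≤ x := by
            rcases hvz with h' | h' <;> omega
          have := gN_dec_step m x h2 (by omega)
          omega
      · subst hz
        have hx1 : 1 ≤ x := hv.resolve_right (by omega)
        have := gN_dbl_step m x hx1 hxm
        omega
    · exact absurd hr (noreach k z (by omega) (by omega))

theorem minR_gN {n m : Int} (hpre : 1 ≤ n ∨ m ≤ n) : minR n m (gN n m) m := by
  refine ⟨reach_gN n m hpre, ?_⟩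
  intro j hj hr
  have := reach_ge m j n hpre hr
  omega

theorem inner_found {m : Int} : ∀ (old acc : List Int) (vis : Std.HashSet Int),
    m ∈ old → findInner m old acc vis = none := by
  intro old
  induction old with
  | nil => intro acc vis h; simp at h
  | cons cur rest ih =>
    intro acc vis h
    by_cases hc : cur = m
    · simp [findInner, hc]
    · have hm : m ∈ rest := by
        rcases List.mem_cons.mp h with h' | h'
        · exact absurd h'.symm hc
        · exact h'
      simp only [findInner, if_neg hc]
      exact ih _ _ hm

-- Bridge: HashSet insert membership in the disjunct order used below.
theorem hset_mem_insert (s : Std.HashSet Int) (x y : Int) :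
    y ∈ s.insert x ↔ y ∈ s ∨ y = x := by
  rw [Std.HashSet.mem_insert]; simp [beq_iff_eq]; tauto

-- Proof-side copy of one iteration of A's inner loop body (the two append/prune branches).
def innStep (m cur : Int) (acc : List Int) (vis : Std.HashSet Int) : List Int × Std.HashSet Int :=
  let p1 : List Int × Std.HashSet Int :=
    if vis.contains (cur - 1) = false ∨ cur - 1 ≠ 0 then
      ((cur - 1) :: acc, vis.insert cur)
    else (acc, vis)
  if cur < m ∧ p1.2.contains (cur * 2) = false then
    ((cur * 2) :: p1.1, p1.2.insert (cur * 2))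
  else p1

theorem findInner_cons (m cur : Int) (rest acc : List Int) (vis : Std.HashSet Int)
    (hc : ¬ cur = m) :
    findInner m (cur :: rest) acc vis
      = findInner m rest (innStep m cur acc vis).1 (innStep m cur acc vis).2 := by
  simp only [findInner, innStep, if_neg hc]

theorem innStep_spec (n m : Int) (k : Nat) (cur : Int) (acc : List Int) (vis : Std.HashSet Int)
    (hcur : ReachN m k n cur)
    (hacc : ∀ x ∈ acc, ReachN m (k + 1) n x)
    (hvis : ∀ x, x ∈ vis → (∃ j ≤ k, ReachN m j n x) ∨ x ∈ acc) :
    (∀ x ∈ acc, x ∈ (innStep m cur acc vis).1) ∧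
    (∀ x ∈ (innStep m cur acc vis).1, ReachN m (k + 1) n x) ∧
    (∀ x, x ∈ (innStep m cur acc vis).2 → (∃ j ≤ k, ReachN m j n x) ∨ x ∈ (innStep m cur acc vis).1) ∧
    (∀ x, minR n m (k + 1) x → stepR m cur x → x ∈ (innStep m cur acc vis).1) := by
  have hdec : ReachN m (k + 1) n (cur - 1) := reach_snoc hcur (Or.inl rfl)
  unfold innStep
  by_cases h1 : vis.contains (cur - 1) = false ∨ cur - 1 ≠ 0
  · rw [if_pos h1]
    simp only []
    by_cases h2 : cur < m ∧ (vis.insert cur).contains (cur * 2) = false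
    · rw [if_pos h2]
      refine ⟨?_, ?_, ?_, ?_⟩
      · intro x hx; simp [hx]
      · intro x hx
        rcases List.mem_cons.mp hx with h' | hx'
        · subst h'; exact reach_snoc hcur (Or.inr ⟨h2.1, rfl⟩)
        · rcases List.mem_cons.mp hx' with h' | hx''
          · subst h'; exact hdec
          · exact hacc x hx''
      · intro x hx
        rcases (hset_mem_insert _ _ _).mp hx with hx' | hx'
        · rcases (hset_mem_insert _ _ _).mp hx' with hx'' | hx''
          · rcases hvis x hx'' with h | h
            · exact Or.inl h
            · exact Or.inr (by simp [h])
          · subst hx''; exact Or.inl ⟨k, le_rfl, hcur⟩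
        · subst hx'; exact Or.inr (by simp)
      · intro x hx hs
        rcases hs with h' | ⟨_, h'⟩
        · subst h'; simp
        · subst h'; simp
    · rw [if_neg h2]
      refine ⟨?_, ?_, ?_, ?_⟩
      · intro x hx; simp [hx]
      · intro x hx
        rcases List.mem_cons.mp hx with h' | hx'
        · subst h'; exact hdec
        · exact hacc x hx'
      · intro x hx
        rcases (hset_mem_insert _ _ _).mp hx with hx' | hx'
        · rcases hvis x hx' with h | h
          · exact Or.inl h
          · exact Or.inr (by simp [h])
        · subst hx'; exact Or.inl ⟨k, le_rfl, hcur⟩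
      · intro x hx hs
        rcases hs with h' | ⟨hlt, h'⟩
        · subst h'; simp
        · -- cur * 2 was pruned: it is already known
          subst h'
          have hcon : (vis.insert cur).contains (cur * 2) = true := by
            cases hb : (vis.insert cur).contains (cur * 2) with
            | false => exact absurd ⟨hlt, hb⟩ h2
            | true => rfl
          have hmem : cur * 2 ∈ vis.insert cur := Std.HashSet.contains_iff_mem.mp hcon
          rcases (hset_mem_insert _ _ _).mp hmem with h' | h'
          · rcases hvis _ h' with ⟨j, hj, hr⟩ | h''
            · exact absurd hr (hx.2 j (by omega))
            · simp [h'']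
          · -- cur * 2 = cur forces cur = 0, contradicting minimality of x = cur * 2
            have : cur * 2 = cur := h'
            have hx0 : cur * 2 = cur := this
            exact absurd (hx0 ▸ hcur) (by
              have : cur * 2 = cur := hx0
              intro hr
              exact hx.2 k (by omega) hr)
  · -- cur - 1 ∈ visited and cur - 1 = 0: nothing appended in branch 1
    have h1' : vis.contains (cur - 1) = true ∧ cur - 1 = 0 := by
      constructor
      · cases hb : vis.contains (cur - 1) with
        | false => exact absurd (Or.inl hb) h1
        | true => rfl
      · by_contra h
        exact h1 (Or.inr h)
    rw [if_neg h1]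
    simp only []
    by_cases h2 : cur < m ∧ vis.contains (cur * 2) = false
    · rw [if_pos h2]
      refine ⟨?_, ?_, ?_, ?_⟩
      · intro x hx; simp [hx]
      · intro x hx
        rcases List.mem_cons.mp hx with h' | hx'
        · subst h'; exact reach_snoc hcur (Or.inr ⟨h2.1, rfl⟩)
        · exact hacc x hx'
      · intro x hx
        rcases (hset_mem_insert _ _ _).mp hx with hx' | hx'
        · rcases hvis x hx' with h | h
          · exact Or.inl h
          · exact Or.inr (by simp [h])
        · subst hx'; exact Or.inr (by simp)
      · intro x hx hs
        rcases hs with h' | ⟨hlt, h'⟩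
        · -- x = cur - 1 = 0 is already in visited: contradiction with minimality or in acc
          subst h'
          have hmem : cur - 1 ∈ vis := Std.HashSet.contains_iff_mem.mp h1'.1
          rcases hvis _ hmem with ⟨j, hj, hr⟩ | h''
          · exact absurd hr (hx.2 j (by omega))
          · simp [h'']
        · subst h'; simp
    · rw [if_neg h2]
      refine ⟨?_, ?_, ?_, ?_⟩
      · intro x hx; exact hx
      · exact hacc
      · intro x hx
        rcases hvis x hx with h | h
        · exact Or.inl h
        · exact Or.inr h
      · intro x hx hs
        rcases hs with h' | ⟨hlt, h'⟩
        · subst h'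
          have hmem : cur - 1 ∈ vis := Std.HashSet.contains_iff_mem.mp h1'.1
          rcases hvis _ hmem with ⟨j, hj, hr⟩ | h''
          · exact absurd hr (hx.2 j (by omega))
          · exact h''
        · subst h'
          have hcon : vis.contains (cur * 2) = true := by
            cases hb : vis.contains (cur * 2) with
            | false => exact absurd ⟨hlt, hb⟩ h2
            | true => rfl
          have hmem : cur * 2 ∈ vis := Std.HashSet.contains_iff_mem.mp hcon
          rcases hvis _ hmem with ⟨j, hj, hr⟩ | h''
          · exact absurd hr (hx.2 j (by omega))
          · exact h''

theorem inner_spec (n m : Int) (k : Nat) :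
    ∀ (old acc : List Int) (vis : Std.HashSet Int),
      (∀ x ∈ old, ReachN m k n x) →
      (∀ x ∈ acc, ReachN m (k + 1) n x) →
      (∀ x, x ∈ vis → (∃ j ≤ k, ReachN m j n x) ∨ x ∈ acc) →
      (∀ x, minR n m (k + 1) x → x ∈ acc ∨ ∃ p ∈ old, stepR m p x) →
      (findInner m old acc vis = none → ReachN m k n m) ∧
      (∀ que' vis', findInner m old acc vis = some (que', vis') →
        (∀ x ∈ que', ReachN m (k + 1) n x) ∧
        (∀ x, x ∈ vis' → ∃ j ≤ k + 1, ReachN m j n x) ∧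
        (∀ x, minR n m (k + 1) x → x ∈ que')) := by
  intro old
  induction old with
  | nil =>
    intro acc vis hold hacc hvis hcomp
    constructor
    · intro h; simp [findInner] at h
    · intro que' vis' h
      simp only [findInner, Option.some.injEq, Prod.mk.injEq] at h
      obtain ⟨h1, h2⟩ := h
      subst h1; subst h2
      refine ⟨?_, ?_, ?_⟩
      · intro x hx
        exact hacc x (List.mem_reverse.mp hx)
      · intro x hx
        rcases hvis x hx with ⟨j, hj, hr⟩ | hx'
        · exact ⟨j, by omega, hr⟩
        · exact ⟨k + 1, le_rfl, hacc x hx'⟩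
      · intro x hx
        rcases hcomp x hx with h | ⟨p, hp, _⟩
        · exact List.mem_reverse.mpr h
        · simp at hp
  | cons cur rest ih =>
    intro acc vis hold hacc hvis hcomp
    have hcur : ReachN m k n cur := hold cur List.mem_cons_self
    have hrest : ∀ x ∈ rest, ReachN m k n x := fun x hx => hold x (List.mem_cons_of_mem _ hx)
    by_cases hc : cur = m
    · constructor
      · intro _; subst hc; exact hcur
      · intro que' vis' h; simp [findInner, hc] at h
    · obtain ⟨S1, S2, S3, S4⟩ := innStep_spec n m k cur acc vis hcur hacc hvis
      have hcomp' : ∀ x, minR n m (k + 1) x →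
          x ∈ (innStep m cur acc vis).1 ∨ ∃ p ∈ rest, stepR m p x := by
        intro x hx
        rcases hcomp x hx with hxa | ⟨p, hp, hs⟩
        · exact Or.inl (S1 x hxa)
        · rcases List.mem_cons.mp hp with h' | h'
          · subst h'; exact Or.inl (S4 x hx hs)
          · exact Or.inr ⟨p, h', hs⟩
      have key := ih (innStep m cur acc vis).1 (innStep m cur acc vis).2 hrest S2 S3 hcomp'
      rw [findInner_cons m cur rest acc vis hc]
      exact key

theorem outer_spec (n m : Int) (hpre : 1 ≤ n ∨ m ≤ n) :
    ∀ (fuel k : Nat) (que : List Int) (vis : Std.HashSet Int),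
      (∀ x ∈ que, ReachN m k n x) →
      (∀ x, x ∈ vis → ∃ j ≤ k, ReachN m j n x) →
      (∀ x, minR n m k x → x ∈ que) →
      k ≤ gN n m →
      gN n m + 1 ≤ fuel + k →
      findOuter m fuel que vis (k : Int) = (gN n m : Int) := by
  intro fuel
  induction fuel with
  | zero => intro k que vis _ _ _ hk hf; exfalso; omega
  | succ fuel ihf =>
    intro k que vis hque hvis hcomp hk hf
    have hd := minR_gN (n := n) (m := m) hpre
    have hne : que ≠ [] := by
      obtain ⟨x, hx⟩ := levels_down (gN n m) ⟨m, hd⟩ k hk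
      intro h
      subst h
      simpa using hcomp x hx
    have hcomp1 : ∀ x, minR n m (k + 1) x → x ∈ ([] : List Int) ∨ ∃ p ∈ que, stepR m p x := by
      intro x hx
      obtain ⟨p, hp, hs⟩ := parent_minR hx
      exact Or.inr ⟨p, hcomp p hp, hs⟩
    have hspec := inner_spec n m k que [] vis hque (by intro x hx; simp at hx)
      (fun x hx => Or.inl (hvis x hx)) hcomp1
    simp only [findOuter]
    rw [if_neg hne]
    cases hto : findInner m que [] vis with
    | none =>
      have hr : ReachN m k n m := hspec.1 hto
      have hge : gN n m ≤ k := reach_ge m k n hpre hr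
      have hkd : k = gN n m := by omega
      simp [hkd]
    | some pr =>
      obtain ⟨que', vis'⟩ := pr
      have hkd : k ≠ gN n m := by
        intro h
        have hmem : m ∈ que := hcomp m (h ▸ hd)
        rw [inner_found que [] vis hmem] at hto
        simp at hto
      obtain ⟨hq', hv', hc'⟩ := hspec.2 que' vis' hto
      have hrec := ihf (k + 1) que' vis' hq' hv' hc' (by omega) (by omega)
      have hcast : ((k : Int) + 1) = ((k + 1 : Nat) : Int) := by push_cast; ring
      rw [hcast]
      exact hrec

theorem altGo_spec (n : Int) : ∀ (fuel : Nat) (m ops : Int), (1 ≤ n ∨ m ≤ n) →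
    gN n m + 1 ≤ fuel → findAltGo n fuel m ops = ops + (gN n m : Int) := by
  intro fuel
  induction fuel with
  | zero => intro m ops _ hf; exfalso; omega
  | succ fuel ihf =>
    intro m ops hpre hf
    simp only [findAltGo]
    by_cases hmn : m > n
    · rw [if_pos hmn]
      have hn : 1 ≤ n := hpre.resolve_right (by omega)
      have hmod : PySem.Int.mod m 2 = m % 2 := PySem.Int.mod_eq_emod_of_pos (by omega)
      by_cases he : m % 2 = 0
      · rw [hmod, if_pos he]
        have hdiv : PySem.Int.floordiv m 2 = m / 2 := PySem.Int.floordiv_eq_ediv_of_pos (by omega)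
        rw [hdiv]
        have hg : gN n m = gN n (m / 2) + 1 := gN_even hn (by omega) he
        rw [ihf (m / 2) (ops + 1) (Or.inl hn) (by omega), hg]
        push_cast; ring
      · rw [hmod, if_neg he]
        have hg1 : gN n (m + 1) = gN n ((m + 1) / 2) + 1 := gN_even hn (by omega) (by omega)
        have hg2 : gN n m = gN n ((m + 1) / 2) + 2 := gN_odd hn (by omega) he
        rw [ihf (m + 1) (ops + 1) (Or.inl hn) (by omega), hg1, hg2]
        push_cast; ring
    · rw [if_neg hmn, gN_base (by omega)]
      omega

-- ===== VERDICT (by name: the statement is the Claim_ definition above) =====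
theorem find_spec : Claim_equal_find := by
  intro n m _ hpre
  unfold Spec_find find find_alt
  have hA : findOuter m (n.natAbs + 2 * m.natAbs + 3) [n] (∅ : Std.HashSet Int) ((0 : Nat) : Int)
      = (gN n m : Int) := by
    apply outer_spec n m hpre
    · intro x hx
      have : x = n := by simpa using hx
      subst this; rfl
    · intro x hx; simp at hx
    · intro x hx
      have : n = x := hx.1
      simp [this]
    · exact Nat.zero_le _
    · have := gN_le_bound n m; omega
  have hB : findAltGo n (n.natAbs + 2 * m.natAbs + 3) m 0 = 0 + (gN n m : Int) := by
    apply altGo_spec n _ m 0 hpre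
    have := gN_le_bound n m; omega
  rw [hB]
  simpa using hA
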